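-- pv_equiv track=rewrite | github.com/khatvangi/ref-network-app | topic_triage.py | _extract_facets
-- ===== SOURCE A (Python) =====
-- from typing import List, Dict, Any, Optional
--
-- def _extract_facets(concepts: List[Dict[str, Any]]) -> Dict[str, List[str]]:
--     """
--     extract suggested facets from concepts.
--     groups concepts into categories for the narrowing wizard.
--     """
--     # simple heuristic: just return top concepts as suggestions
--     method_keywords = ['method', 'algorithm', 'technique', 'analysis', 'model', 'simulation']
--     organism_keywords = ['human', 'mouse', 'bacteria', 'virus', 'plant', 'yeast', 'cell']
--
--     methods = []
--     organisms = []
--     domains = []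
--
--     for c in concepts:
--         name = c.get('name', '').lower()
--         if any(kw in name for kw in method_keywords):
--             methods.append(c['name'])
--         elif any(kw in name for kw in organism_keywords):
--             organisms.append(c['name'])
--         else:
--             domains.append(c['name'])
--
--     return {
--         'subdomain_options': domains[:5],
--         'method_options': methods[:5],
--         'organism_options': organisms[:5]
--     }
-- ===== SOURCE B (Python) =====
-- from itertools import islice
-- from typing import List, Dict, Any
--
-- METHOD_KEYWORDS = ['method', 'algorithm', 'technique', 'analysis', 'model', 'simulation']
-- ORGANISM_KEYWORDS = ['human', 'mouse', 'bacteria', 'virus', 'plant', 'yeast', 'cell']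
--
--
-- def _is_method(name: str) -> bool:
--     return any(kw in name for kw in METHOD_KEYWORDS)
--
--
-- def _is_organism(name: str) -> bool:
--     return any(kw in name for kw in ORGANISM_KEYWORDS)
--
--
-- def _extract_facets(concepts: List[Dict[str, Any]]) -> Dict[str, List[str]]:
--     """Same facet buckets as A, but each bucket is its own lazy pass that
--     stops as soon as 5 matches are found (islice short-circuits)."""
--     def first5(test):
--         return list(islice((c['name'] for c in concepts
--                             if test(c['name'].lower())), 5))
--
--     methods = first5(_is_method)
--     organisms = first5(lambda n: _is_organism(n) and not _is_method(n))
--     domains = first5(lambda n: not _is_method(n) and not _is_organism(n))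
--
--     return {
--         'subdomain_options': domains,
--         'method_options': methods,
--         'organism_options': organisms
--     }
-- ===== Notes on version B (the rewrite author's own statement) =====
-- stated objective: alternative
-- what changed: Instead of one loop appending into three full lists and slicing afterwards, B computes each bucket as its own lazy filtered pass over concepts that stops as soon as 5 matches are found (islice over a generator).
import Mathlib
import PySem

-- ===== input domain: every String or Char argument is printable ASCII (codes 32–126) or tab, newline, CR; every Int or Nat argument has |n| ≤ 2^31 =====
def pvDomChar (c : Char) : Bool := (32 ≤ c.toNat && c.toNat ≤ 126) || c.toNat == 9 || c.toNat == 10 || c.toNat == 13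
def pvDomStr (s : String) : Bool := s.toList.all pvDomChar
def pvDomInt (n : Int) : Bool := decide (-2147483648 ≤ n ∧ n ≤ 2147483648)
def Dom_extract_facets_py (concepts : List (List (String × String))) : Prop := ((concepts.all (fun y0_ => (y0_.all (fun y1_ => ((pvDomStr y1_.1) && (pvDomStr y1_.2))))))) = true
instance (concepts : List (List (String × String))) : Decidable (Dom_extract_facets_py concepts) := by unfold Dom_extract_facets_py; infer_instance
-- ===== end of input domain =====

-- B replaces A's single loop with three early-stopping filtered passes (one per bucket, each capped at 5); return-value equivalence proved on inputs where every concept has a 'name' key.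


-- ===== PORT A =====
def methodKeywords : List String :=
  ["method", "algorithm", "technique", "analysis", "model", "simulation"]
def organismKeywords : List String :=
  ["human", "mouse", "bacteria", "virus", "plant", "yeast", "cell"]

-- c['name']; Python raises KeyError when absent — excluded by Pre_ (getD "" there)
def cname (c : List (String × String)) : String :=
  ((PySem.Dict.mk c).get? "name").getD ""

-- the loop body of A (appends into the three buckets)
def facetStep (acc : List String × List String × List String)
    (c : List (String × String)) : List String × List String × List String :=
  let (methods, organisms, domains) := acc
  let name := PySem.Str.lower ((PySem.Dict.mk c).getD "name" "")
  if methodKeywords.any (fun kw => PySem.Str.isIn kw name) then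
    (methods ++ [cname c], organisms, domains)
  else if organismKeywords.any (fun kw => PySem.Str.isIn kw name) then
    (methods, organisms ++ [cname c], domains)
  else
    (methods, organisms, domains ++ [cname c])

def extract_facets_py (concepts : List (List (String × String))) : List (String × List String) :=
  let acc := concepts.foldl facetStep ([], [], [])
  [("subdomain_options", acc.2.2.take 5),    -- domains[:5]
   ("method_options", acc.1.take 5),         -- methods[:5]
   ("organism_options", acc.2.1.take 5)]     -- organisms[:5]

-- ===== PORT B =====
def isMethodName (n : String) : Bool := methodKeywords.any (fun kw => PySem.Str.isIn kw n)
def isOrganismName (n : String) : Bool := organismKeywords.any (fun kw => PySem.Str.isIn kw n)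

-- list(islice((c['name'] for c in concepts if test(c['name'].lower())), k)): stops once k found
def first5 (test : String → Bool) : Nat → List (List (String × String)) → List String
  | _, [] => []
  | 0, _ => []
  | Nat.succ k, c :: rest =>
      if test (PySem.Str.lower (cname c)) then cname c :: first5 test k rest
      else first5 test (Nat.succ k) rest

def extract_facets_py_alt (concepts : List (List (String × String))) : List (String × List String) :=
  let methods := first5 isMethodName 5 concepts
  let organisms := first5 (fun n => isOrganismName n && !isMethodName n) 5 concepts
  let domains := first5 (fun n => !isMethodName n && !isOrganismName n) 5 concepts
  [("subdomain_options", domains),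
   ("method_options", methods),
   ("organism_options", organisms)]

-- ===== PRECONDITION & SPEC =====
-- Pre_ excludes concepts missing the 'name' key, on which A (and B) raise KeyError.
def Pre_extract_facets_py (concepts : List (List (String × String))) : Prop :=
  ∀ c ∈ concepts, ((PySem.Dict.mk c).get? "name").isSome
instance (concepts : List (List (String × String))) : Decidable (Pre_extract_facets_py concepts) := by unfold Pre_extract_facets_py; infer_instance

def pvWitness_extract_facets_py : (List (List (String × String))) :=
  [[("name", "mouse model")], [("name", "yeast")], [("name", "xyz")]]

def Spec_extract_facets_py (concepts : List (List (String × String))) (out : List (String × List String)) : Prop := out = extract_facets_py_alt concepts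
instance (concepts : List (List (String × String))) (out : List (String × List String)) : Decidable (Spec_extract_facets_py concepts out) := by unfold Spec_extract_facets_py; infer_instance

-- ===== CLAIM (what is proved, stated in full; the proofs are below) =====
def Claim_equal_extract_facets_py : Prop := ∀ (concepts : List (List (String × String))), Dom_extract_facets_py concepts → Pre_extract_facets_py concepts → Spec_extract_facets_py concepts (extract_facets_py concepts)

-- ===== LEMMAS AND PROOFS =====

-- B's capped pass = filter-then-take over the projected names
theorem first5_eq (test : String → Bool) :
    ∀ (k : Nat) (l : List (List (String × String))),
      first5 test k l
        = ((l.map cname).filter (fun nm => test (PySem.Str.lower nm))).take k := by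
  intro k l
  induction l generalizing k with
  | nil => cases k <;> simp [first5]
  | cons c rest ih =>
      cases k with
      | zero => simp [first5]
      | succ k =>
          by_cases h : test (PySem.Str.lower (cname c)) = true
          · simp [first5, h, ih]
          · simp [first5, h, ih]

-- A's fold builds the three filtered lists (appended to the accumulators)
theorem facetStep_eq (ms os ds : List String) (c : List (String × String))
    (_hc : ((PySem.Dict.mk c).get? "name").isSome) :
    facetStep (ms, os, ds) c =
      if isMethodName (PySem.Str.lower (cname c)) then (ms ++ [cname c], os, ds)
      else if isOrganismName (PySem.Str.lower (cname c)) then (ms, os ++ [cname c], ds)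
      else (ms, os, ds ++ [cname c]) := by
  have hname : (PySem.Dict.mk c).getD "name" "" = cname c := by
    simp [cname, PySem.Dict.getD_eq_get?_getD]
  simp only [facetStep, hname]
  rfl

theorem foldA_eq : ∀ (l : List (List (String × String))),
    (∀ c ∈ l, ((PySem.Dict.mk c).get? "name").isSome) →
    ∀ (ms os ds : List String),
      l.foldl facetStep (ms, os, ds)
      = (ms ++ (l.map cname).filter (fun nm => isMethodName (PySem.Str.lower nm)),
         os ++ (l.map cname).filter
                 (fun nm => isOrganismName (PySem.Str.lower nm) && !isMethodName (PySem.Str.lower nm)),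
         ds ++ (l.map cname).filter
                 (fun nm => !isMethodName (PySem.Str.lower nm) && !isOrganismName (PySem.Str.lower nm))) := by
  intro l
  induction l with
  | nil => intro _ ms os ds; simp
  | cons c rest ih =>
      intro hpre ms os ds
      have hc : ((PySem.Dict.mk c).get? "name").isSome := hpre c (by simp)
      have ihr := ih (fun c hc => hpre c (List.mem_cons_of_mem _ hc))
      rw [List.foldl_cons, facetStep_eq ms os ds c hc]
      cases hm : isMethodName (PySem.Str.lower (cname c)) <;>
        cases ho : isOrganismName (PySem.Str.lower (cname c)) <;>
          simp [hm, ho, ihr]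

-- ===== VERDICT (by name: the statement is the Claim_ definition above) =====
theorem extract_facets_py_spec : Claim_equal_extract_facets_py := by
  intro concepts _ hpre
  unfold Spec_extract_facets_py extract_facets_py extract_facets_py_alt
  rw [foldA_eq concepts hpre [] [] []]
  simp only [List.nil_append, first5_eq]
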